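-- pv_equiv track=rewrite | github.com/TadeuszSikorski/advent_of_code_in_python | 2021/07/solution.py | calculate_cheapest_cost_of_moving_to_best_position
-- ===== SOURCE A (Python) =====
-- def _calculate_newest_cost_of_moving_to_best_position(positions, best_position):
--     newest_cost_moving_to_best_position = 0
--
--     for position in positions:
--         if position > best_position:
--             newest_cost_moving_to_best_position += sum(
--                 [number for number in range(1, (position - best_position) + 1)]
--             )
--         else:
--             newest_cost_moving_to_best_position += sum(
--                 [number for number in range(1, (best_position - position) + 1)]
--             )
--
--     return newest_cost_moving_to_best_position
--
-- def calculate_cheapest_cost_of_moving_to_best_position(positions):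
--     best_positions = {}
--
--     for best_position in range(min(positions), max(positions) + 1):
--         if best_position not in best_positions.keys():
--             best_positions[best_position] = 0
--
--         best_positions[
--             best_position
--         ] = _calculate_newest_cost_of_moving_to_best_position(positions, best_position)
--
--     return min(best_positions.values())
-- ===== SOURCE B (Python) =====
-- def calculate_cheapest_cost_of_moving_to_best_position(positions):
--     lo = min(positions)
--     hi = max(positions)
--     n = len(positions)
--     s = sum(positions)
--     counts = {}
--     for p in positions:
--         counts[p] = counts.get(p, 0) + 1
--     # cost at candidate lo, via the closed-form triangular cost d*(d+1)//2
--     cost = sum((p - lo) * (p - lo + 1) // 2 for p in positions)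
--     best = cost
--     le = 0  # number of positions <= current candidate
--     for c in range(lo, hi):
--         le += counts.get(c, 0)
--         # moving the target from c to c+1 changes the cost by n*c - s + le
--         cost += n * c - s + le
--         if cost < best:
--             best = cost
--     return best
-- ===== Notes on version B (the rewrite author's own statement) =====
-- stated objective: faster
-- what changed: instead of re-scanning all positions for every candidate target and summing range(1,d+1) each time, B computes the cost at the minimum position once with the closed-form triangular cost and then rolls the cost from each candidate to the next in O(1) via the recurrence cost(c+1)=cost(c)+n*c-sum+count(p<=c), maintained with a counting dict
import Mathlib
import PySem

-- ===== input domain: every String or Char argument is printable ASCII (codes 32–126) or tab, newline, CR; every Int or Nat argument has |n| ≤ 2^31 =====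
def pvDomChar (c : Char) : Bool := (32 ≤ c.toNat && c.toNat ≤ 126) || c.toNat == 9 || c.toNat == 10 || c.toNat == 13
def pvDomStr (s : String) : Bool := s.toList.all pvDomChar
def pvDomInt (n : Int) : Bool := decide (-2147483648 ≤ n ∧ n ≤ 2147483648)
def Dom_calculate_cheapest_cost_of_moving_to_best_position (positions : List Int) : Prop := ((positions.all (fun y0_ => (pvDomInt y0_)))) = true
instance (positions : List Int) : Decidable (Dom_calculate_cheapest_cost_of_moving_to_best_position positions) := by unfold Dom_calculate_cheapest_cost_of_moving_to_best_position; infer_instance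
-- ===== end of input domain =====

-- B drops A's per-candidate rescans: it computes the cost at the minimum once via the closed-form
-- triangular cost and rolls it to each next candidate in O(1) with a counting dict (objective: faster).

-- ===== PORT A =====
-- port of _calculate_newest_cost_of_moving_to_best_position
def pvNewestCostA (positions : List Int) (best : Int) : Int :=
  positions.foldl (fun acc p =>
    if p > best then acc + (PySem.List.pyRange 1 ((p - best) + 1) 1).sum
    else acc + (PySem.List.pyRange 1 ((best - p) + 1) 1).sum) 0

def calculate_cheapest_cost_of_moving_to_best_position (positions : List Int) : Int :=
  let lo := (PySem.List.min? positions (fun x => x)).getD 0   -- min() raises on []; excluded by Pre_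
  let hi := (PySem.List.max? positions (fun x => x)).getD 0
  let d := (PySem.List.pyRange lo (hi + 1) 1).foldl
    (fun d c => (if d.contains c then d else d.insert c 0).insert c (pvNewestCostA positions c))
    PySem.Dict.empty
  (PySem.List.min? d.values (fun x => x)).getD 0

-- ===== PORT B =====
-- counts[p] = counts.get(p, 0) + 1 loop
def pvCountsB (positions : List Int) : PySem.Dict Int Int :=
  positions.foldl (fun d p => d.insert p (d.getD p 0 + 1)) PySem.Dict.empty

def calculate_cheapest_cost_of_moving_to_best_position_alt (positions : List Int) : Int :=
  let lo := (PySem.List.min? positions (fun x => x)).getD 0   -- min() raises on []; excluded by Pre_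
  let hi := (PySem.List.max? positions (fun x => x)).getD 0
  let n : Int := positions.length
  let s := positions.sum
  let counts := pvCountsB positions
  let cost0 := (positions.map (fun p => PySem.Int.floordiv ((p - lo) * (p - lo + 1)) 2)).sum
  -- state (cost, le, best); for c in range(lo, hi): le += counts.get(c,0); cost += n*c - s + le; best = min
  let st := (PySem.List.pyRange lo hi 1).foldl
    (fun (st : Int × Int × Int) c =>
      let le := st.2.1 + counts.getD c 0
      let cost := st.1 + n * c - s + le
      (cost, le, if cost < st.2.2 then cost else st.2.2))
    (cost0, 0, cost0)
  st.2.2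

-- ===== PRECONDITION & SPEC =====
-- Pre_ excludes only the empty list, on which Python's min() raises ValueError.
def Pre_calculate_cheapest_cost_of_moving_to_best_position (positions : List Int) : Prop := positions ≠ []
instance (positions : List Int) : Decidable (Pre_calculate_cheapest_cost_of_moving_to_best_position positions) := by unfold Pre_calculate_cheapest_cost_of_moving_to_best_position; infer_instance
def pvWitness_calculate_cheapest_cost_of_moving_to_best_position : List Int := [16, 1, 2, 0, 4]

def Spec_calculate_cheapest_cost_of_moving_to_best_position (positions : List Int) (out : Int) : Prop := out = calculate_cheapest_cost_of_moving_to_best_position_alt positions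
instance (positions : List Int) (out : Int) : Decidable (Spec_calculate_cheapest_cost_of_moving_to_best_position positions out) := by unfold Spec_calculate_cheapest_cost_of_moving_to_best_position; infer_instance

-- ===== CLAIM (what is proved, stated in full; the proofs are below) =====
def Claim_equal_calculate_cheapest_cost_of_moving_to_best_position : Prop := ∀ (positions : List Int), Dom_calculate_cheapest_cost_of_moving_to_best_position positions → Pre_calculate_cheapest_cost_of_moving_to_best_position positions → Spec_calculate_cheapest_cost_of_moving_to_best_position positions (calculate_cheapest_cost_of_moving_to_best_position positions)

-- ===== LEMMAS AND PROOFS =====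

-- the common value: total triangular cost of moving every position to c
def pvTri (positions : List Int) (c : Int) : Int :=
  (positions.map (fun p => PySem.Int.floordiv (|p - c| * (|p - c| + 1)) 2)).sum

def pvCntLT (positions : List Int) (c : Int) : Int :=
  (positions.countP (fun p => decide (p < c)) : Int)

-- sum 1..n = n(n+1)/2, stated for the mapped range list
lemma pv_two_mul_sum_range (n : Nat) :
    2 * ((List.range n).map (fun k : Nat => (1:Int) + (k:Int))).sum = n * (n + 1) := by
  induction n with
  | zero => simp
  | succ m ih =>
    rw [List.range_succ]
    simp only [List.map_append, List.map_cons, List.map_nil, List.sum_append, List.sum_cons,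
      List.sum_nil]
    push_cast at *
    nlinarith [ih]

lemma pv_tri_sum (d : Int) (h : 0 ≤ d) :
    (PySem.List.pyRange 1 (d + 1) 1).sum = PySem.Int.floordiv (d * (d + 1)) 2 := by
  rw [PySem.Int.floordiv_eq_ediv_of_pos (by norm_num), PySem.List.pyRange_one]
  have hd : ((d + 1) - 1).toNat = d.toNat := by omega
  rw [hd]
  have := pv_two_mul_sum_range d.toNat
  have hcast : (d.toNat : Int) = d := by omega
  rw [hcast] at this
  omega

-- A's helper computes the triangular cost
lemma pv_helper_eq_tri (positions : List Int) (c : Int) :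
    pvNewestCostA positions c = pvTri positions c := by
  unfold pvNewestCostA pvTri
  rw [show (fun (acc : Int) (p : Int) =>
      if p > c then acc + (PySem.List.pyRange 1 ((p - c) + 1) 1).sum
      else acc + (PySem.List.pyRange 1 ((c - p) + 1) 1).sum)
    = (fun acc p => acc + (if p > c then (PySem.List.pyRange 1 ((p - c) + 1) 1).sum
      else (PySem.List.pyRange 1 ((c - p) + 1) 1).sum)) from by
      funext acc p; split_ifs <;> rfl]
  rw [PySem.List.foldl_add]
  rw [zero_add]
  congr 1
  apply List.map_congr_left
  intro p _
  by_cases hpc : p > c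
  · rw [if_pos hpc, pv_tri_sum (p - c) (by omega), abs_of_nonneg (by omega : (0:Int) ≤ p - c)]
  · rw [if_neg hpc, pv_tri_sum (c - p) (by omega), abs_of_nonpos (by omega : p - c ≤ (0:Int))]
    ring_nf

-- the dict loop over fresh keys is the simple insert loop
lemma pv_fold_eq (positions : List Int) (cs : List Int) (d : PySem.Dict Int Int)
    (hfresh : ∀ c ∈ cs, d.contains c = false) (hnd : cs.Nodup) :
    cs.foldl (fun d c => (if d.contains c then d else d.insert c 0).insert c (pvNewestCostA positions c)) d
      = cs.foldl (fun d c => d.insert c (pvNewestCostA positions c)) d := by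
  induction cs generalizing d with
  | nil => rfl
  | cons c t ih =>
    simp only [List.foldl_cons]
    rw [hfresh c (by simp), if_neg (by simp), PySem.Dict.insert_insert_self]
    exact ih _ (fun c' hc' => by
      rw [PySem.Dict.contains_insert]
      have : c' ≠ c := fun h => (List.nodup_cons.mp hnd).1 (h ▸ hc')
      simp [this, hfresh c' (List.mem_cons_of_mem _ hc')]) (List.nodup_cons.mp hnd).2

lemma pv_values_fold (positions : List Int) (cs : List Int) (hnd : cs.Nodup) :
    (cs.foldl (fun d c => (if d.contains c then d else d.insert c 0).insert c (pvNewestCostA positions c)) PySem.Dict.empty).values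
      = cs.map (pvNewestCostA positions) := by
  rw [pv_fold_eq positions cs PySem.Dict.empty (fun c _ => by simp [PySem.Dict.contains, PySem.Dict.empty]) hnd]
  have := PySem.Dict.items_foldl_insert_fresh (l := cs) (k := fun c => c)
    (v := fun c => pvNewestCostA positions c) (d := PySem.Dict.empty)
    (fun a _ => by simp [PySem.Dict.contains, PySem.Dict.empty]) (by simpa using hnd)
  simp only [PySem.Dict.values, this]
  simp [PySem.Dict.empty, List.map_map, Function.comp]

-- per-element recurrence: T(|p-(c+1)|) = T(|p-c|) + (c - p) + [p ≤ c]
lemma pv_tri_step_elem (p c : Int) :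
    PySem.Int.floordiv (|p - (c+1)| * (|p - (c+1)| + 1)) 2
      = PySem.Int.floordiv (|p - c| * (|p - c| + 1)) 2 + (c - p) + (if p < c + 1 then 1 else 0) := by
  rw [PySem.Int.floordiv_eq_ediv_of_pos (by norm_num), PySem.Int.floordiv_eq_ediv_of_pos (by norm_num)]
  obtain ⟨k, hk⟩ : (2:Int) ∣ |p - c| * (|p - c| + 1) := (Int.even_mul_succ_self _).two_dvd
  by_cases hpc : p < c + 1
  · have habs : |p - (c+1)| = |p - c| + 1 := by
      rcases abs_cases (p - c) with ⟨h1, h2⟩ | ⟨h1, h2⟩ <;>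
        rcases abs_cases (p - (c+1)) with ⟨h3, h4⟩ | ⟨h3, h4⟩ <;> omega
    rw [habs, if_pos hpc]
    have h2 : (|p - c| + 1) * (|p - c| + 1 + 1) = 2 * (k + |p - c| + 1) := by nlinarith [hk]
    have habs2 : |p - c| = c - p := by
      rcases abs_cases (p - c) with ⟨h1, h2⟩ | ⟨h1, h2⟩ <;> omega
    rw [h2, hk, Int.mul_ediv_cancel_left _ (by norm_num), Int.mul_ediv_cancel_left _ (by norm_num)]
    omega
  · have habs : |p - (c+1)| = |p - c| - 1 := by
      rcases abs_cases (p - c) with ⟨h1, h2⟩ | ⟨h1, h2⟩ <;>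
        rcases abs_cases (p - (c+1)) with ⟨h3, h4⟩ | ⟨h3, h4⟩ <;> omega
    rw [habs, if_neg hpc]
    have h2 : (|p - c| - 1) * (|p - c| - 1 + 1) = 2 * (k - |p - c|) := by nlinarith [hk]
    have habs2 : |p - c| = p - c := by
      rcases abs_cases (p - c) with ⟨h1, h2⟩ | ⟨h1, h2⟩ <;> omega
    rw [h2, hk, Int.mul_ediv_cancel_left _ (by norm_num), Int.mul_ediv_cancel_left _ (by norm_num)]
    omega

-- cost recurrence over the whole list
lemma pv_tri_step (positions : List Int) (c : Int) :
    pvTri positions (c + 1)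
      = pvTri positions c + (positions.length : Int) * c - positions.sum + pvCntLT positions (c + 1) := by
  unfold pvTri pvCntLT
  induction positions with
  | nil => simp
  | cons p t ih =>
    simp only [List.map_cons, List.sum_cons, List.countP_cons, List.length_cons]
    rw [pv_tri_step_elem p c]
    push_cast
    by_cases hpc : p < c + 1
    · simp only [if_pos hpc, decide_eq_true_eq] at *
      linarith [ih]
    · simp only [if_neg hpc, decide_eq_true_eq] at *
      linarith [ih]

lemma pv_cnt_step (positions : List Int) (c : Int) :
    pvCntLT positions c + (positions.count c : Int) = pvCntLT positions (c + 1) := by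
  unfold pvCntLT
  induction positions with
  | nil => simp
  | cons p t ih =>
    simp only [List.countP_cons, List.count_cons, beq_iff_eq, decide_eq_true_eq]
    split_ifs <;> push_cast <;> omega

-- counts.get(c, 0) reads the multiplicity of c
lemma pv_counts_getD (positions : List Int) (c : Int) :
    (pvCountsB positions).getD c 0 = (positions.count c : Int) := by
  unfold pvCountsB
  rw [PySem.Dict.foldl_insert_getD_add_one_eq_counter, PySem.Dict.getD_counter]

-- the rolling fold computes (tri b, cntLT (b), min of best over tri (a+1..b))
lemma pv_fold_inv (positions : List Int) (a b best : Int) (hab : a ≤ b) :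
    (PySem.List.pyRange a b 1).foldl
      (fun (st : Int × Int × Int) c =>
        let le := st.2.1 + (pvCountsB positions).getD c 0
        let cost := st.1 + (positions.length : Int) * c - positions.sum + le
        (cost, le, if cost < st.2.2 then cost else st.2.2))
      (pvTri positions a, pvCntLT positions a, best)
    = (pvTri positions b, pvCntLT positions b,
        ((PySem.List.pyRange (a+1) (b+1) 1).map (pvTri positions)).foldl min best) := by
  have h : ∀ (n : Nat) (a best : Int), b - a = n →
      (PySem.List.pyRange a b 1).foldl
        (fun (st : Int × Int × Int) c =>
          let le := st.2.1 + (pvCountsB positions).getD c 0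
          let cost := st.1 + (positions.length : Int) * c - positions.sum + le
          (cost, le, if cost < st.2.2 then cost else st.2.2))
        (pvTri positions a, pvCntLT positions a, best)
      = (pvTri positions b, pvCntLT positions b,
          ((PySem.List.pyRange (a+1) (b+1) 1).map (pvTri positions)).foldl min best) := by
    intro n
    induction n with
    | zero =>
      intro a best h0
      have hba : b = a := by omega
      subst hba
      rw [PySem.List.pyRange_one_eq_nil (le_refl _), PySem.List.pyRange_one_eq_nil (le_refl _)]
      simp
    | succ m ih =>
      intro a best h0
      have hlt : a < b := by omega
      rw [PySem.List.pyRange_one_cons hlt, PySem.List.pyRange_one_cons (by omega : a + 1 < b + 1)]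
      simp only [List.foldl_cons, List.map_cons]
      have hle : pvCntLT positions a + (pvCountsB positions).getD a 0 = pvCntLT positions (a+1) := by
        rw [pv_counts_getD]; exact pv_cnt_step positions a
      have hcost : pvTri positions a + (positions.length : Int) * a - positions.sum
          + pvCntLT positions (a+1) = pvTri positions (a+1) := by
        rw [pv_tri_step]
      simp only [hle, hcost]
      rw [show (if pvTri positions (a+1) < best then pvTri positions (a+1) else best)
          = min best (pvTri positions (a+1)) from by
        rcases lt_or_ge (pvTri positions (a+1)) best with h | h
        · rw [if_pos h, min_eq_right (le_of_lt h)]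
        · rw [if_neg (not_lt.mpr h), min_eq_left h]]
      exact ih (a+1) (min best (pvTri positions (a+1))) (by omega)
  exact h (b - a).toNat a best (by omega)

-- min over a nonempty mapped range is the rolling min
lemma pv_min_map (f : Int → Int) (a b : Int) (hab : a ≤ b) :
    (PySem.List.min? ((PySem.List.pyRange a (b+1) 1).map f) (fun x => x)).getD 0
      = ((PySem.List.pyRange (a+1) (b+1) 1).map f).foldl min (f a) := by
  rw [PySem.List.pyRange_one_cons (by omega : a < b + 1), List.map_cons, PySem.List.min?_id_cons]
  rfl

-- ===== VERDICT (by name: the statement is the Claim_ definition above) =====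
theorem calculate_cheapest_cost_of_moving_to_best_position_spec : Claim_equal_calculate_cheapest_cost_of_moving_to_best_position := by
  intro positions _ hne
  unfold Spec_calculate_cheapest_cost_of_moving_to_best_position
  unfold calculate_cheapest_cost_of_moving_to_best_position calculate_cheapest_cost_of_moving_to_best_position_alt
  simp only []
  -- names for lo, hi
  obtain ⟨lo, hlo⟩ : ∃ lo, PySem.List.min? positions (fun x => x) = some lo := by
    cases h : PySem.List.min? positions (fun x => x) with
    | none => exact absurd ((PySem.List.min?_eq_none_iff positions _).mp h) hne
    | some m => exact ⟨m, rfl⟩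
  obtain ⟨hi, hhi⟩ : ∃ hi, PySem.List.max? positions (fun x => x) = some hi := by
    cases h : PySem.List.max? positions (fun x => x) with
    | none => exact absurd ((PySem.List.max?_eq_none_iff positions _).mp h) hne
    | some m => exact ⟨m, rfl⟩
  rw [hlo, hhi]
  simp only [Option.getD_some]
  have hmem : lo ∈ positions := PySem.List.min?_mem hlo
  have hmin : ∀ y ∈ positions, lo ≤ y := fun y hy => PySem.List.min?_isMin hlo y hy
  have hle : lo ≤ hi := PySem.List.max?_isMax hhi lo hmem
  -- A side: min over the list of per-candidate costs
  rw [pv_values_fold positions _ (PySem.List.nodup_pyRange_one _ _)]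
  have hmapA : (PySem.List.pyRange lo (hi+1) 1).map (pvNewestCostA positions)
      = (PySem.List.pyRange lo (hi+1) 1).map (pvTri positions) :=
    List.map_congr_left fun c _ => pv_helper_eq_tri positions c
  rw [hmapA, pv_min_map (pvTri positions) lo hi hle]
  -- B side: the rolling fold
  have hcost0 : (positions.map (fun p => PySem.Int.floordiv ((p - lo) * (p - lo + 1)) 2)).sum
      = pvTri positions lo := by
    unfold pvTri
    congr 1
    apply List.map_congr_left
    intro p hp
    rw [abs_of_nonneg (by have := hmin p hp; omega : (0:Int) ≤ p - lo)]
  have hcnt0 : (0:Int) = pvCntLT positions lo := by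
    unfold pvCntLT
    rw [show positions.countP (fun p => decide (p < lo)) = 0 from
      List.countP_eq_zero.mpr fun p hp => by
        simp only [decide_eq_true_eq]; exact not_lt.mpr (hmin p hp)]
    rfl
  have hinv := pv_fold_inv positions lo hi (pvTri positions lo) hle
  rw [← hcnt0] at hinv
  rw [hcost0, hinv]
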